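-- pv_equiv track=rewrite | github.com/swemoney/AdventOfCode | 2025/08/day.py | create_circuits
-- ===== SOURCE A (Python) =====
-- def create_circuits(connections):
--     parent = {}
--     for a, b in connections:
--         parent.setdefault(a, a)
--         parent.setdefault(b, b)
--
--     def find(x):
--         if parent[x] != x:
--             parent[x] = find(parent[x])
--         return parent[x]
--
--     def union(a, b):
--         parent_a, parent_b = find(a), find(b)
--         if parent_a != parent_b:
--             parent[parent_b] = parent_a
--
--     for a, b in connections:
--         union(a, b)
--
--     circuits = {}
--     for connection in parent:
--         root = find(connection)
--         circuits.setdefault(root, []).append(connection)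
--
--     return sorted(circuits.values(), key=len, reverse=True)
-- ===== SOURCE B (Python) =====
-- def create_circuits(connections):
--     # Quick-find: a flat node -> component-id map, merged by relabeling, instead of
--     # A's parent forest with recursive path-compressing find.
--     comp = {}            # node -> component id
--     order = []           # nodes in first-appearance order
--     next_id = 0
--     for a, b in connections:
--         for n in (a, b):
--             if n not in comp:
--                 comp[n] = next_id
--                 next_id += 1
--                 order.append(n)
--         ca, cb = comp[a], comp[b]
--         if ca != cb:
--             comp = {n: (ca if c == cb else c) for n, c in comp.items()}
--     groups = {}
--     for n in order:
--         groups.setdefault(comp[n], []).append(n)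
--     return sorted(groups.values(), key=len, reverse=True)
-- ===== Notes on version B (the rewrite author's own statement) =====
-- stated objective: alternative
-- what changed: Replaces A's union-find parent forest with recursive path-compressing find by a flat quick-find map (node -> component id) merged by relabeling, with one final grouping pass over nodes in first-appearance order.
import Mathlib
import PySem

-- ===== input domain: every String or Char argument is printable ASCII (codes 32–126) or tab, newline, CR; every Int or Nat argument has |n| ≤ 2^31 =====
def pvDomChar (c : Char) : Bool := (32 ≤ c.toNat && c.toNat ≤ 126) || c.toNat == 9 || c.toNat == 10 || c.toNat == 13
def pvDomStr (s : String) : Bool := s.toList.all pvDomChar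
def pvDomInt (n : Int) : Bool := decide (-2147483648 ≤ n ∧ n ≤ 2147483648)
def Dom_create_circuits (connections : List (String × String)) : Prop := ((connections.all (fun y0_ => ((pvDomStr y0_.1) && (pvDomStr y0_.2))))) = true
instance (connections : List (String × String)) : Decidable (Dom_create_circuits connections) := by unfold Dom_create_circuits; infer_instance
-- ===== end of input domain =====

-- B replaces A's union-find parent forest (recursive path-compressing find) by a flat
-- quick-find node→component-id map merged by relabeling; same return value, no speed claim.

-- ===== PORT A =====
-- find(x) with path compression; the fuel argument only makes the Python recursion
-- structural (callers pass the dict size, which always exceeds the chain length,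
-- as the invariant UFInv below shows).
def pvFindA (fuel : Nat) (p : PySem.Dict String String) (x : String) :
    PySem.Dict String String × String :=
  match fuel with
  | 0 => (p, x)
  | fuel + 1 =>
    match p.get? x with
    | none => (p, x)
    | some px =>
      if px = x then (p, px)
      else
        let r := pvFindA fuel p px
        (r.1.insert x r.2, r.2)

def pvUnionA (p : PySem.Dict String String) (a b : String) : PySem.Dict String String :=
  let fa := pvFindA p.size p a
  let fb := pvFindA fa.1.size fa.1 b
  if fa.2 ≠ fb.2 then fb.1.insert fb.2 fa.2 else fb.1

def pvBuildParent (connections : List (String × String)) : PySem.Dict String String :=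
  connections.foldl (fun p ab => (p.setdefault ab.1 ab.1).setdefault ab.2 ab.2) PySem.Dict.empty

def create_circuits (connections : List (String × String)) : List (List String) :=
  let parent1 := connections.foldl (fun p ab => pvUnionA p ab.1 ab.2) (pvBuildParent connections)
  let st := parent1.keys.foldl
    (fun (st : PySem.Dict String String × PySem.Dict String (List String)) k =>
      let f := pvFindA st.1.size st.1 k
      (f.1, st.2.modify f.2 [] (· ++ [k])))
    (parent1, PySem.Dict.empty)
  PySem.List.sorted st.2.values (fun l => PySem.List.len l) true

-- ===== PORT B =====
-- state: (comp : node -> component id, order : nodes in first-appearance order, next_id)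
def pvAddNode (st : PySem.Dict String Int × List String × Int) (n : String) :
    PySem.Dict String Int × List String × Int :=
  if st.1.contains n then st
  else (st.1.insert n st.2.2, st.2.1 ++ [n], st.2.2 + 1)

def pvStepB (st : PySem.Dict String Int × List String × Int) (ab : String × String) :
    PySem.Dict String Int × List String × Int :=
  let st := pvAddNode (pvAddNode st ab.1) ab.2
  let ca := st.1.getD ab.1 0
  let cb := st.1.getD ab.2 0
  if ca ≠ cb then
    (PySem.Dict.mk (st.1.items.map (fun kv => if kv.2 = cb then (kv.1, ca) else kv)), st.2)
  else st

def create_circuits_alt (connections : List (String × String)) : List (List String) :=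
  let st := connections.foldl pvStepB (PySem.Dict.empty, [], 0)
  let groups := st.2.1.foldl
    (fun (g : PySem.Dict Int (List String)) n => g.modify (st.1.getD n 0) [] (· ++ [n]))
    PySem.Dict.empty
  PySem.List.sorted groups.values (fun l => PySem.List.len l) true

-- ===== PRECONDITION & SPEC =====
def Spec_create_circuits (connections : List (String × String)) (out : List (List String)) : Prop := out = create_circuits_alt connections
instance (connections : List (String × String)) (out : List (List String)) : Decidable (Spec_create_circuits connections out) := by unfold Spec_create_circuits; infer_instance

-- ===== CLAIM (what is proved, stated in full; the proofs are below) =====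
def Claim_equal_create_circuits : Prop := ∀ (connections : List (String × String)), Dom_create_circuits connections → Spec_create_circuits connections (create_circuits connections)

-- ===== LEMMAS AND PROOFS =====

def UFInv (p : PySem.Dict String String) (r : String → String) (d : String → Nat) : Prop :=
  p.keys.Nodup ∧
  ∀ x ∈ p.keys, ∃ px, p.get? x = some px ∧ px ∈ p.keys ∧ r px = r x ∧
    (px = x → r x = x) ∧ (px ≠ x → d px < d x) ∧
    d x < p.keys.countP (fun y => r y == r x)

lemma uf_root (p : PySem.Dict String String) (r : String → String) (d : String → Nat)
    (h : UFInv p r d) :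
    ∀ (n : Nat) (x : String), x ∈ p.keys → d x ≤ n →
      r x ∈ p.keys ∧ p.get? (r x) = some (r x) ∧ r (r x) = r x ∧ d (r x) ≤ d x := by
  intro n
  induction n with
  | zero =>
    intro x hx hd
    obtain ⟨px, hget, hmem, hr, hrefl, hdec, _⟩ := h.2 x hx
    by_cases hpx : px = x
    · subst hpx
      have hroot := hrefl rfl
      refine ⟨?_, ?_, ?_, ?_⟩ <;> simp [hroot, hget, hx]
    · exact absurd (hdec hpx) (by omega)
  | succ n ih =>
    intro x hx hd
    obtain ⟨px, hget, hmem, hr, hrefl, hdec, _⟩ := h.2 x hx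
    by_cases hpx : px = x
    · subst hpx
      have hroot := hrefl rfl
      refine ⟨?_, ?_, ?_, ?_⟩ <;> simp [hroot, hget, hx]
    · have hlt := hdec hpx
      have := ih px hmem (by omega)
      rw [hr] at this
      exact ⟨this.1, this.2.1, this.2.2.1, by omega⟩

lemma find_spec (r : String → String) (d : String → Nat) :
    ∀ (fuel : Nat) (p : PySem.Dict String String), UFInv p r d →
      ∀ x ∈ p.keys, d x < fuel →
      (pvFindA fuel p x).2 = r x ∧
      UFInv (pvFindA fuel p x).1 r d ∧
      (pvFindA fuel p x).1.keys = p.keys ∧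
      (∀ y, (pvFindA fuel p x).1.get? y = p.get? y ∨
        (r y = r x ∧ y ∈ p.keys ∧ (∃ py, p.get? y = some py ∧ py ≠ y) ∧
          (pvFindA fuel p x).1.get? y = some (r x))) := by
  intro fuel
  induction fuel with
  | zero => intro p h x hx hf; omega
  | succ fuel ih =>
    intro p h x hx hf
    obtain ⟨px, hget, hmem, hr, hrefl, hdec, hbound⟩ := h.2 x hx
    by_cases hpx : px = x
    · subst hpx
      have hroot := hrefl rfl
      simp only [pvFindA, hget]
      exact ⟨hroot.symm, h, rfl, fun y => Or.inl rfl⟩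
    · have hd' : d px < fuel := by have := hdec hpx; omega
      obtain ⟨ih2, ihQ, ihK, ihCh⟩ := ih p h px hmem hd'
      have hrx : (pvFindA fuel p px).2 = r x := by rw [ih2, hr]
      have hxq : x ∈ (pvFindA fuel p px).1.keys := by rw [ihK]; exact hx
      have hcont : (pvFindA fuel p px).1.contains x = true :=
        (PySem.Dict.contains_iff_mem_keys _ _).2 hxq
      have hkeysIns := PySem.Dict.keys_insert_of_contains (pvFindA fuel p px).1
        ((pvFindA fuel p px).2) hcont
      have hrt := uf_root p r d h (d x) x hx (le_refl _)
      have hrtpx := uf_root p r d h (d px) px hmem (le_refl _)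
      simp only [pvFindA, hget, if_neg hpx]
      refine ⟨hrx, ?_, ?_, ?_⟩
      · constructor
        · rw [hkeysIns]; exact ihQ.1
        · intro y hy
          rw [hkeysIns, ihK] at hy
          by_cases hyx : y = x
          · subst hyx
            refine ⟨r y, ?_, ?_, ?_, ?_, ?_, ?_⟩
            · rw [hrx] at *
              exact PySem.Dict.get?_insert_self (pvFindA fuel p px).1 y (r y)
            · rw [hkeysIns, ihK]; exact hrt.1
            · exact hrt.2.2.1
            · intro he; rw [← he]; exact hrt.2.2.1
            · intro _
              have h1 : d (r px) ≤ d px := hrtpx.2.2.2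
              have h2 : d px < d y := hdec hpx
              rw [hr] at h1; omega
            · rw [hkeysIns, ihK]; exact hbound
          · obtain ⟨py, hgy, hymem, hry, hyrefl, hydec, hybound⟩ := ihQ.2 y (by rw [ihK]; exact hy)
            refine ⟨py, ?_, ?_, hry, hyrefl, hydec, ?_⟩
            · rw [hrx]
              rw [PySem.Dict.get?_insert_of_ne _ _ hyx]
              exact hgy
            · rw [hkeysIns]; exact hymem
            · rw [hkeysIns]; exact hybound
      · rw [hkeysIns]; exact ihK
      · intro y
        by_cases hyx : y = x
        · subst hyx
          refine Or.inr ⟨rfl, hx, ⟨px, hget, hpx⟩, ?_⟩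
          rw [hrx] at *
          exact PySem.Dict.get?_insert_self (pvFindA fuel p px).1 y (r y)
        · rcases ihCh y with hsame | ⟨hry, hymem, hpy, hgy⟩
          · left
            rw [hrx, PySem.Dict.get?_insert_of_ne _ _ hyx]
            exact hsame
          · refine Or.inr ⟨by rw [hry, hr], hymem, hpy, ?_⟩
            rw [hrx, PySem.Dict.get?_insert_of_ne _ _ hyx, hgy, hr]

lemma countP_or_disjoint (f g : String → Bool) :
    ∀ (l : List String), (∀ x ∈ l, ¬(f x = true ∧ g x = true)) →
    l.countP (fun x => f x || g x) = l.countP f + l.countP g := by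
  intro l
  induction l with
  | nil => intro; rfl
  | cons hd tl ih =>
    intro hdisj
    have htl := ih (fun x hx => hdisj x (by simp [hx]))
    by_cases hf : f hd <;> by_cases hg : g hd
    · exact absurd ⟨hf, hg⟩ (hdisj hd (by simp))
    all_goals simp [hf, hg, htl] <;> omega

lemma dict_size_eq_keys_length (q : PySem.Dict String String) : q.size = q.keys.length := by
  simp [PySem.Dict.size, PySem.Dict.keys]

lemma uf_depth_lt_size (p : PySem.Dict String String) (r : String → String) (d : String → Nat)
    (h : UFInv p r d) (x : String) (hx : x ∈ p.keys) : d x < p.size := by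
  obtain ⟨_, _, _, _, _, _, hb⟩ := h.2 x hx
  calc d x < p.keys.countP (fun y => r y == r x) := hb
    _ ≤ p.keys.length := List.countP_le_length
    _ = p.size := (dict_size_eq_keys_length p).symm

lemma union_spec (p : PySem.Dict String String) (r : String → String) (d : String → Nat)
    (h : UFInv p r d) (a b : String) (ha : a ∈ p.keys) (hb : b ∈ p.keys) :
    ∃ d', UFInv (pvUnionA p a b) (fun x => if r x = r b then r a else r x) d' ∧
      (pvUnionA p a b).keys = p.keys ∧
      (∀ y, (pvUnionA p a b).get? y = p.get? y ∨
        ((r y = r a ∨ r y = r b) ∧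
          ∃ v, (pvUnionA p a b).get? y = some v ∧ (v = r a ∨ v = r b))) := by
  obtain ⟨fa2, hQ1, hK1, hCh1⟩ := find_spec r d p.size p h a ha (uf_depth_lt_size p r d h a ha)
  set p1 := (pvFindA p.size p a).1 with hp1
  have hb1 : b ∈ p1.keys := by rw [hK1]; exact hb
  obtain ⟨fb2, hQ2, hK2, hCh2⟩ := find_spec r d p1.size p1 hQ1 b hb1
    (uf_depth_lt_size p1 r d hQ1 b hb1)
  set p2 := (pvFindA p1.size p1 b).1 with hp2
  have hK : p2.keys = p.keys := by rw [hK2, hK1]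
  have hu : pvUnionA p a b = if r a ≠ r b then p2.insert (r b) (r a) else p2 := by
    simp only [pvUnionA, fa2, fb2, ← hp1, ← hp2]
  -- combined change description through the two finds
  have hCh : ∀ y, p2.get? y = p.get? y ∨
      ((r y = r a ∨ r y = r b) ∧ ∃ v, p2.get? y = some v ∧ (v = r a ∨ v = r b)) := by
    intro y
    rcases hCh2 y with h2 | ⟨hry, _, _, hv⟩
    · rcases hCh1 y with h1 | ⟨hry, _, _, hv⟩
      · exact Or.inl (h2.trans h1)
      · exact Or.inr ⟨Or.inl hry, r a, h2.trans hv, Or.inl rfl⟩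
    · exact Or.inr ⟨Or.inr hry, r b, hv, Or.inr rfl⟩
  by_cases hab : r a = r b
  · have hreq : (fun x => if r x = r b then r a else r x) = r := by
      funext x
      by_cases hx : r x = r b
      · rw [if_pos hx, hab, hx]
      · rw [if_neg hx]
    have hueq : pvUnionA p a b = p2 := by rw [hu, if_neg (by simp [hab])]
    rw [hueq, hreq]
    exact ⟨d, hQ2, hK, hCh⟩
  · have hueq : pvUnionA p a b = p2.insert (r b) (r a) := by rw [hu, if_pos (by simp [hab])]
    have hrta := uf_root p r d h (d a) a ha (le_refl _)
    have hrtb := uf_root p r d h (d b) b hb (le_refl _)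
    have hrbmem2 : r b ∈ p2.keys := by rw [hK]; exact hrtb.1
    have hcont : p2.contains (r b) = true := (PySem.Dict.contains_iff_mem_keys _ _).2 hrbmem2
    have hkeysIns : (p2.insert (r b) (r a)).keys = p.keys := by
      rw [PySem.Dict.keys_insert_of_contains p2 (r a) hcont, hK]
    -- class bounds at the two roots
    obtain ⟨_, _, _, _, _, _, hbnda⟩ := h.2 (r a) hrta.1
    obtain ⟨_, _, _, _, _, _, hbndb⟩ := h.2 (r b) hrtb.1
    rw [hrta.2.2.1] at hbnda
    rw [hrtb.2.2.1] at hbndb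
    -- the merged class count
    have hsplit : p.keys.countP (fun z => (if r z = r b then r a else r z) == r a)
        = p.keys.countP (fun z => r z == r a) + p.keys.countP (fun z => r z == r b) := by
      have hcg : p.keys.countP (fun z => (if r z = r b then r a else r z) == r a)
          = p.keys.countP (fun z => (r z == r a) || (r z == r b)) := by
        apply List.countP_congr
        intro z _
        by_cases hz : r z = r b
        · simp [hz]
        · simp only [if_neg hz, beq_iff_eq, Bool.or_eq_true]
          exact ⟨fun h' => Or.inl h', fun h' => h'.resolve_right hz⟩
      rw [hcg]
      exact countP_or_disjoint _ _ _ (fun x _ hxc => by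
        simp only [beq_iff_eq] at hxc
        exact hab (hxc.1.symm.trans hxc.2))
    have hother : ∀ w, r w ≠ r a → r w ≠ r b →
        p.keys.countP (fun z => (if r z = r b then r a else r z) == r w)
          = p.keys.countP (fun z => r z == r w) := by
      intro w hwa hwb
      apply List.countP_congr
      intro z _
      by_cases hz : r z = r b
      · simp only [if_pos hz, beq_iff_eq]
        exact ⟨fun h' => absurd h'.symm hwa, fun h' => absurd (h'.symm.trans hz) hwb⟩
      · simp only [if_neg hz]
    have hc1 : ¬ r (r a) = r b := by rw [hrta.2.2.1]; exact hab
    have hc2 : r (r b) = r b := hrtb.2.2.1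
    rw [hueq]
    refine ⟨fun x => if r x = r b then d x + d (r a) + 1 else d x, ⟨?_, ?_⟩, hkeysIns, ?_⟩
    · rw [hkeysIns]; exact h.1
    · intro y hy
      rw [hkeysIns] at hy
      by_cases hyrb : y = r b
      · subst hyrb
        refine ⟨r a, ?_, ?_, ?_, ?_, ?_, ?_⟩
        · exact PySem.Dict.get?_insert_self p2 (r b) (r a)
        · rw [hkeysIns]; exact hrta.1
        · simp only [if_pos hc2, hrta.2.2.1, ite_self]
        · intro he; exact absurd he hab
        · intro _
          simp only [if_neg hc1, if_pos hc2]
          omega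
        · simp only [if_pos hc2, hkeysIns]
          rw [hsplit]
          omega
      · have hy2 : y ∈ p2.keys := by rw [hK]; exact hy
        obtain ⟨py, hgy, hpymem, hrpy, hyrefl, hydec, hybnd⟩ := hQ2.2 y hy2
        refine ⟨py, ?_, ?_, ?_, ?_, ?_, ?_⟩
        · rw [PySem.Dict.get?_insert_of_ne _ _ hyrb]; exact hgy
        · rw [hkeysIns, ← hK]; exact hpymem
        · simp only [hrpy]
        · intro he
          have hyy := hyrefl he
          have hnyb : r y ≠ r b := by
            intro hc
            exact hyrb (hyy.symm.trans hc)
          simp only [if_neg hnyb]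
          exact hyy
        · intro hne
          have := hydec hne
          simp only [hrpy]
          by_cases hyb : r y = r b
          · simp only [if_pos hyb]; omega
          · simp only [if_neg hyb]; omega
        · rw [hkeysIns]
          rw [hK] at hybnd
          by_cases hyb : r y = r b
          · have e1 : (fun x => if r x = r b then d x + d (r a) + 1 else d x) y
                = d y + d (r a) + 1 := by simp [hyb]
            have e2 : (fun x => if r x = r b then r a else r x) y = r a := by simp [hyb]
            rw [hyb] at hybnd
            simp only [e1, e2]
            rw [hsplit]
            omega
          · by_cases hya : r y = r a
            · have e1 : (fun x => if r x = r b then d x + d (r a) + 1 else d x) y = d y := by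
                simp [hyb]
              have e2 : (fun x => if r x = r b then r a else r x) y = r a := by simp [hya]
              rw [hya] at hybnd
              simp only [e1, e2]
              rw [hsplit]
              omega
            · have e1 : (fun x => if r x = r b then d x + d (r a) + 1 else d x) y = d y := by
                simp [hyb]
              have e2 : (fun x => if r x = r b then r a else r x) y = r y := by simp [hyb]
              simp only [e1, e2]
              rw [hother y hya hyb]
              exact hybnd
    · intro y
      by_cases hyrb : y = r b
      · subst hyrb
        exact Or.inr ⟨Or.inr hrtb.2.2.1, r a, PySem.Dict.get?_insert_self p2 _ _, Or.inl rfl⟩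
      · rw [PySem.Dict.get?_insert_of_ne _ _ hyrb]
        exact hCh y

def Coupled (p : PySem.Dict String String) (c : PySem.Dict String Int) (nid : Int)
    (r : String → String) (d : String → Nat) : Prop :=
  UFInv p r d ∧
  c.keys.Nodup ∧
  (∀ x ∈ c.keys, x ∈ p.keys) ∧
  (∀ x ∈ p.keys, x ∉ c.keys → p.get? x = some x) ∧
  (∀ x ∈ c.keys, ∀ px, p.get? x = some px → px ∈ c.keys) ∧
  (∀ x ∈ c.keys, ∀ y ∈ c.keys, (c.getD x 0 = c.getD y 0 ↔ r x = r y)) ∧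
  (∀ x ∈ c.keys, c.getD x 0 < nid)

lemma coupled_root_mem (p : PySem.Dict String String) (c : PySem.Dict String Int) (nid : Int)
    (r : String → String) (d : String → Nat) (h : Coupled p c nid r d) :
    ∀ (n : Nat) (x : String), x ∈ c.keys → d x ≤ n → r x ∈ c.keys := by
  intro n
  induction n with
  | zero =>
    intro x hx hd
    obtain ⟨px, hget, _, hr, hrefl, hdec, _⟩ := h.1.2 x (h.2.2.1 x hx)
    by_cases hpx : px = x
    · rw [hrefl hpx]; exact hx
    · exact absurd (hdec hpx) (by omega)
  | succ n ih =>
    intro x hx hd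
    obtain ⟨px, hget, _, hr, hrefl, hdec, _⟩ := h.1.2 x (h.2.2.1 x hx)
    by_cases hpx : px = x
    · rw [hrefl hpx]; exact hx
    · have hpxc : px ∈ c.keys := h.2.2.2.2.1 x hx px hget
      have := ih px hpxc (by have := hdec hpx; omega)
      rwa [hr] at this

lemma coupled_untouched_root (p : PySem.Dict String String) (c : PySem.Dict String Int)
    (nid : Int) (r : String → String) (d : String → Nat) (h : Coupled p c nid r d)
    (x : String) (hx : x ∈ p.keys) (hnx : x ∉ c.keys) : r x = x := by
  obtain ⟨px, hget, _, _, hrefl, _, _⟩ := h.1.2 x hx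
  have := h.2.2.2.1 x hx hnx
  rw [this] at hget
  exact hrefl (by injection hget with hh; exact hh.symm)

def addK (ks : List String) (n : String) : List String := if n ∈ ks then ks else ks ++ [n]

lemma addNode_spec (p : PySem.Dict String String) (c : PySem.Dict String Int)
    (ord : List String) (nid : Int) (r : String → String) (d : String → Nat)
    (h : Coupled p c nid r d) (a : String) (ha : a ∈ p.keys) (hord : ord = c.keys) :
    Coupled p (pvAddNode (c, ord, nid) a).1 (pvAddNode (c, ord, nid) a).2.2 r d ∧
    (pvAddNode (c, ord, nid) a).2.1 = (pvAddNode (c, ord, nid) a).1.keys ∧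
    (pvAddNode (c, ord, nid) a).1.keys = addK c.keys a := by
  obtain ⟨hUF, hnd, hsub, hunt, hclo, hker, hbnd⟩ := h
  by_cases hc : c.contains a
  · have hmem : a ∈ c.keys := (PySem.Dict.contains_iff_mem_keys _ _).1 hc
    have he : pvAddNode (c, ord, nid) a = (c, ord, nid) := by simp [pvAddNode, hc]
    rw [he]
    exact ⟨⟨hUF, hnd, hsub, hunt, hclo, hker, hbnd⟩, hord, by simp [addK, hmem]⟩
  · have hnmem : a ∉ c.keys := fun hm => hc ((PySem.Dict.contains_iff_mem_keys _ _).2 hm)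
    have hcf : c.contains a = false := by
      cases hcc : c.contains a
      · rfl
      · exact absurd hcc hc
    have hkeys : (c.insert a nid).keys = c.keys ++ [a] :=
      PySem.Dict.keys_insert_of_not_contains c nid hcf
    have hra : r a = a :=
      coupled_untouched_root p c nid r d ⟨hUF, hnd, hsub, hunt, hclo, hker, hbnd⟩ a ha hnmem
    have hga : p.get? a = some a := hunt a ha hnmem
    have hgetD : ∀ x, (c.insert a nid).getD x 0 = if x = a then nid else c.getD x 0 := by
      intro x
      exact PySem.Dict.getD_insert c a x nid 0
    have he : pvAddNode (c, ord, nid) a = (c.insert a nid, ord ++ [a], nid + 1) := by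
      simp [pvAddNode, hcf]
    rw [he]
    have haddk : addK c.keys a = c.keys ++ [a] := by simp [addK, hnmem]
    refine ⟨⟨hUF, ?_, ?_, ?_, ?_, ?_, ?_⟩, by rw [hkeys, hord], by rw [hkeys, haddk]⟩
    · rw [hkeys]
      apply List.Nodup.append hnd (List.nodup_singleton a)
      intro z hz hz2
      simp at hz2
      exact hnmem (hz2 ▸ hz)
    · intro x hx
      rw [hkeys] at hx
      rcases List.mem_append.1 hx with hx | hx
      · exact hsub x hx
      · simp at hx; subst hx; exact ha
    · intro x hx hnx
      rw [hkeys] at hnx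
      exact hunt x hx (fun hm => hnx (List.mem_append.2 (Or.inl hm)))
    · intro x hx px hpx
      rw [hkeys] at hx ⊢
      rcases List.mem_append.1 hx with hx | hx
      · exact List.mem_append.2 (Or.inl (hclo x hx px hpx))
      · simp at hx; subst hx
        rw [hga] at hpx
        injection hpx with he
        subst he
        exact List.mem_append.2 (Or.inr (by simp))
    · intro x hx y hy
      rw [hkeys] at hx hy
      simp only [hgetD]
      rcases List.mem_append.1 hx with hx' | hx' <;> rcases List.mem_append.1 hy with hy' | hy'
      · have hxa : x ≠ a := fun he => hnmem (he ▸ hx')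
        have hya : y ≠ a := fun he => hnmem (he ▸ hy')
        rw [if_neg hxa, if_neg hya]
        exact hker x hx' y hy'
      · simp at hy'
        have hxa : x ≠ a := fun he => hnmem (he ▸ hx')
        rw [if_neg hxa, if_pos hy', hy']
        constructor
        · intro he; exact absurd he (by have := hbnd x hx'; omega)
        · intro he
          have hrx : r x ∈ c.keys := coupled_root_mem p c nid r d
            ⟨hUF, hnd, hsub, hunt, hclo, hker, hbnd⟩ (d x) x hx' (le_refl _)
          rw [hra] at he
          rw [he] at hrx
          exact absurd hrx hnmem
      · simp at hx'
        have hya : y ≠ a := fun he => hnmem (he ▸ hy')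
        rw [if_pos hx', if_neg hya, hx']
        constructor
        · intro he; exact absurd he.symm (by have := hbnd y hy'; omega)
        · intro he
          have hry : r y ∈ c.keys := coupled_root_mem p c nid r d
            ⟨hUF, hnd, hsub, hunt, hclo, hker, hbnd⟩ (d y) y hy' (le_refl _)
          rw [hra] at he
          rw [← he] at hry
          exact absurd hry hnmem
      · simp at hx' hy'
        rw [if_pos hx', if_pos hy', hx', hy']
        simp
    · intro x hx
      rw [hkeys] at hx
      simp only [hgetD]
      rcases List.mem_append.1 hx with hx' | hx'
      · have hxa : x ≠ a := fun he => hnmem (he ▸ hx')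
        rw [if_neg hxa]
        have := hbnd x hx'
        omega
      · simp at hx'; subst hx'
        rw [if_pos rfl]
        omega

lemma mem_addK_self (ks : List String) (n : String) : n ∈ addK ks n := by
  unfold addK
  by_cases h : n ∈ ks <;> simp [h]

lemma mem_addK_of_mem (ks : List String) (n x : String) (hx : x ∈ ks) : x ∈ addK ks n := by
  unfold addK
  by_cases h : n ∈ ks <;> simp [h, hx]

lemma merge_get? (c : PySem.Dict String Int) (ca cb : Int) (x : String) :
    (PySem.Dict.mk (c.items.map (fun kv => if kv.2 = cb then (kv.1, ca) else kv))).get? x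
      = (c.get? x).map (fun v => if v = cb then ca else v) := by
  obtain ⟨its⟩ := c
  induction its with
  | nil => rfl
  | cons hd tl ih =>
    simp only [List.map_cons]
    by_cases hk : hd.1 == x
    · by_cases hv : hd.2 = cb <;>
        simp [PySem.Dict.get?, hk, hv]
    · have h1 : (PySem.Dict.mk (hd :: tl)).get? x = (PySem.Dict.mk tl).get? x := by
        simp [PySem.Dict.get?, hk]
      by_cases hv : hd.2 = cb
      · simpa [PySem.Dict.get?, hk, hv] using ih
      · simpa [PySem.Dict.get?, hk, hv] using ih

lemma merge_keys (c : PySem.Dict String Int) (ca cb : Int) :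
    (PySem.Dict.mk (c.items.map (fun kv => if kv.2 = cb then (kv.1, ca) else kv))).keys
      = c.keys := by
  simp only [PySem.Dict.keys, List.map_map]
  apply List.map_congr_left
  intro kv _
  by_cases hv : kv.2 = cb <;> simp [hv]

lemma getD_of_mem_keys (c : PySem.Dict String Int) (x : String) (hx : x ∈ c.keys) :
    c.get? x = some (c.getD x 0) := by
  cases hg : c.get? x with
  | none => exact absurd ((PySem.Dict.get?_eq_none_iff_not_mem_keys c x).1 hg) (not_not_intro hx)
  | some v => simp [PySem.Dict.getD, hg]

lemma edge_step (p : PySem.Dict String String) (c : PySem.Dict String Int)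
    (ord : List String) (nid : Int) (r : String → String) (d : String → Nat)
    (h : Coupled p c nid r d) (hord : ord = c.keys) (ab : String × String)
    (ha : ab.1 ∈ p.keys) (hb : ab.2 ∈ p.keys) :
    ∃ r' d', Coupled (pvUnionA p ab.1 ab.2) (pvStepB (c, ord, nid) ab).1
        (pvStepB (c, ord, nid) ab).2.2 r' d' ∧
      (pvStepB (c, ord, nid) ab).2.1 = (pvStepB (c, ord, nid) ab).1.keys ∧
      (pvStepB (c, ord, nid) ab).1.keys = addK (addK c.keys ab.1) ab.2 ∧
      (pvUnionA p ab.1 ab.2).keys = p.keys := by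
  obtain ⟨hA1, hO1, hK1⟩ := addNode_spec p c ord nid r d h ab.1 ha hord
  obtain ⟨hA2, hO2, hK2⟩ := addNode_spec p (pvAddNode (c, ord, nid) ab.1).1
    (pvAddNode (c, ord, nid) ab.1).2.1 (pvAddNode (c, ord, nid) ab.1).2.2 r d hA1 ab.2 hb hO1
  set s2 := pvAddNode (pvAddNode (c, ord, nid) ab.1) ab.2 with hs2
  have ha2 : ab.1 ∈ s2.1.keys := by
    rw [hK2]
    exact mem_addK_of_mem _ _ _ (by rw [hK1]; exact mem_addK_self _ _)
  have hb2 : ab.2 ∈ s2.1.keys := by rw [hK2]; exact mem_addK_self _ _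
  obtain ⟨hUF2, hnd2, hsub2, hunt2, hclo2, hker2, hbnd2⟩ := hA2
  obtain ⟨d', hUFu, hKu, hChu⟩ := union_spec p r d hUF2 ab.1 ab.2 ha hb
  set u := pvUnionA p ab.1 ab.2 with hu
  set ca := s2.1.getD ab.1 0 with hca
  set cb := s2.1.getD ab.2 0 with hcb
  have hkercab : ca = cb ↔ r ab.1 = r ab.2 := hker2 ab.1 ha2 ab.2 hb2
  have hkeysA : addK (addK c.keys ab.1) ab.2 = s2.1.keys := by rw [hK2, hK1]
  have hrmem : ∀ x ∈ s2.1.keys, r x ∈ s2.1.keys := fun x hx =>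
    coupled_root_mem p s2.1 s2.2.2 r d ⟨hUF2, hnd2, hsub2, hunt2, hclo2, hker2, hbnd2⟩
      (d x) x hx (le_refl _)
  have hstep : pvStepB (c, ord, nid) ab =
      if ca ≠ cb then
        (PySem.Dict.mk (s2.1.items.map (fun kv => if kv.2 = cb then (kv.1, ca) else kv)), s2.2)
      else s2 := rfl
  by_cases heq : r ab.1 = r ab.2
  · have hceq : ca = cb := hkercab.2 heq
    have hT : pvStepB (c, ord, nid) ab = s2 := by rw [hstep, if_neg (by simp [hceq])]
    rw [hT]
    have hreq : (fun x => if r x = r ab.2 then r ab.1 else r x) = r := by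
      funext x
      by_cases hx : r x = r ab.2
      · rw [if_pos hx, heq, hx]
      · rw [if_neg hx]
    rw [hreq] at hUFu
    refine ⟨r, d', ⟨hUFu, hnd2, ?_, ?_, ?_, hker2, hbnd2⟩, hO2, hkeysA.symm, hKu⟩
    · intro x hx; rw [hKu]; exact hsub2 x hx
    · intro x hx hnx
      rw [hKu] at hx
      rcases hChu x with hsame | ⟨hroots, v, hv, hcases⟩
      · rw [hsame]; exact hunt2 x hx hnx
      · exfalso
        have hrx : r x = x := coupled_untouched_root p s2.1 s2.2.2 r d
          ⟨hUF2, hnd2, hsub2, hunt2, hclo2, hker2, hbnd2⟩ x hx hnx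
        rcases hroots with h1 | h1
        · exact hnx (hrx ▸ (h1 ▸ hrmem ab.1 ha2))
        · exact hnx (hrx ▸ (h1 ▸ hrmem ab.2 hb2))
    · intro x hx px hpx
      rcases hChu x with hsame | ⟨hroots, v, hv, hcases⟩
      · rw [hsame] at hpx; exact hclo2 x hx px hpx
      · rw [hv] at hpx
        injection hpx with he
        subst he
        rcases hcases with h1 | h1
        · exact h1 ▸ hrmem ab.1 ha2
        · exact h1 ▸ hrmem ab.2 hb2
  · have hcne : ca ≠ cb := fun hc => heq (hkercab.1 hc)
    have hT : pvStepB (c, ord, nid) ab =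
        (PySem.Dict.mk (s2.1.items.map (fun kv => if kv.2 = cb then (kv.1, ca) else kv)), s2.2) := by
      rw [hstep, if_pos (by simp [hcne])]
    rw [hT]
    set T := PySem.Dict.mk (s2.1.items.map (fun kv => if kv.2 = cb then (kv.1, ca) else kv)) with hTdef
    have hTkeys : T.keys = s2.1.keys := merge_keys s2.1 ca cb
    have hTgetD : ∀ x ∈ s2.1.keys, T.getD x 0 = if s2.1.getD x 0 = cb then ca else s2.1.getD x 0 := by
      intro x hx
      have hm := merge_get? s2.1 ca cb x
      rw [getD_of_mem_keys s2.1 x hx] at hm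
      simp only [Option.map_some] at hm
      rw [← hTdef] at hm
      simp [PySem.Dict.getD, hm]
    have hxcb : ∀ x ∈ s2.1.keys, (s2.1.getD x 0 = cb ↔ r x = r ab.2) := fun x hx =>
      hker2 x hx ab.2 hb2
    have hxca : ∀ x ∈ s2.1.keys, (s2.1.getD x 0 = ca ↔ r x = r ab.1) := fun x hx =>
      hker2 x hx ab.1 ha2
    refine ⟨fun x => if r x = r ab.2 then r ab.1 else r x, d',
      ⟨hUFu, ?_, ?_, ?_, ?_, ?_, ?_⟩, by show s2.2.1 = T.keys; rw [hTkeys]; exact hO2,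
      by show T.keys = _; rw [hTkeys, hkeysA], hKu⟩
    · rw [hTkeys]; exact hnd2
    · intro x hx; rw [hTkeys] at hx; rw [hKu]; exact hsub2 x hx
    · intro x hx hnx
      rw [hKu] at hx
      rw [hTkeys] at hnx
      rcases hChu x with hsame | ⟨hroots, v, hv, hcases⟩
      · rw [hsame]; exact hunt2 x hx hnx
      · exfalso
        have hrx : r x = x := coupled_untouched_root p s2.1 s2.2.2 r d
          ⟨hUF2, hnd2, hsub2, hunt2, hclo2, hker2, hbnd2⟩ x hx hnx
        rcases hroots with h1 | h1
        · exact hnx (hrx ▸ (h1 ▸ hrmem ab.1 ha2))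
        · exact hnx (hrx ▸ (h1 ▸ hrmem ab.2 hb2))
    · intro x hx px hpx
      rw [hTkeys] at hx ⊢
      rcases hChu x with hsame | ⟨hroots, v, hv, hcases⟩
      · rw [hsame] at hpx; exact hclo2 x hx px hpx
      · rw [hv] at hpx
        injection hpx with he
        subst he
        rcases hcases with h1 | h1
        · exact h1 ▸ hrmem ab.1 ha2
        · exact h1 ▸ hrmem ab.2 hb2
    · intro x hx y hy
      rw [hTkeys] at hx hy
      rw [hTgetD x hx, hTgetD y hy]
      by_cases h1 : r x = r ab.2 <;> by_cases h2 : r y = r ab.2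
      · rw [if_pos ((hxcb x hx).2 h1), if_pos ((hxcb y hy).2 h2)]
        simp [h1, h2]
      · rw [if_pos ((hxcb x hx).2 h1), if_neg (fun hc => h2 ((hxcb y hy).1 hc))]
        simp only [if_pos h1, if_neg h2]
        constructor
        · intro he; exact ((hxca y hy).1 he.symm).symm
        · intro he; exact ((hxca y hy).2 he.symm).symm
      · rw [if_neg (fun hc => h1 ((hxcb x hx).1 hc)), if_pos ((hxcb y hy).2 h2)]
        simp only [if_neg h1, if_pos h2]
        exact hxca x hx
      · rw [if_neg (fun hc => h1 ((hxcb x hx).1 hc)), if_neg (fun hc => h2 ((hxcb y hy).1 hc))]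
        simp only [if_neg h1, if_neg h2]
        exact hker2 x hx y hy
    · intro x hx
      rw [hTkeys] at hx
      rw [hTgetD x hx]
      have h1 := hbnd2 x hx
      have h2 := hbnd2 ab.1 ha2
      rw [← hca] at h2
      by_cases hc : s2.1.getD x 0 = cb
      · rw [if_pos hc]; exact h2
      · rw [if_neg hc]; exact h1

lemma run_coupled :
    ∀ (es : List (String × String)) (p : PySem.Dict String String)
      (c : PySem.Dict String Int) (ord : List String) (nid : Int)
      (r : String → String) (d : String → Nat),
      Coupled p c nid r d → ord = c.keys →
      (∀ ab ∈ es, ab.1 ∈ p.keys ∧ ab.2 ∈ p.keys) →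
      ∃ r' d',
        Coupled (es.foldl (fun p ab => pvUnionA p ab.1 ab.2) p)
          (es.foldl pvStepB (c, ord, nid)).1 (es.foldl pvStepB (c, ord, nid)).2.2 r' d' ∧
        (es.foldl pvStepB (c, ord, nid)).2.1 = (es.foldl pvStepB (c, ord, nid)).1.keys ∧
        (es.foldl pvStepB (c, ord, nid)).1.keys
          = es.foldl (fun ks ab => addK (addK ks ab.1) ab.2) c.keys ∧
        (es.foldl (fun p ab => pvUnionA p ab.1 ab.2) p).keys = p.keys := by
  intro es
  induction es with
  | nil =>
    intro p c ord nid r d h hord _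
    exact ⟨r, d, h, hord, rfl, rfl⟩
  | cons ab es ih =>
    intro p c ord nid r d h hord hmem
    obtain ⟨r1, d1, hC1, hO1, hK1, hKu⟩ :=
      edge_step p c ord nid r d h hord ab (hmem ab (by simp)).1 (hmem ab (by simp)).2
    have hmem' : ∀ e ∈ es, e.1 ∈ (pvUnionA p ab.1 ab.2).keys ∧ e.2 ∈ (pvUnionA p ab.1 ab.2).keys := by
      intro e he
      rw [hKu]
      exact hmem e (by simp [he])
    obtain ⟨r', d', hC', hO', hK', hKu'⟩ := ih (pvUnionA p ab.1 ab.2)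
      (pvStepB (c, ord, nid) ab).1 (pvStepB (c, ord, nid) ab).2.1
      (pvStepB (c, ord, nid) ab).2.2 r1 d1 hC1 hO1 hmem'
    refine ⟨r', d', hC', hO', ?_, ?_⟩
    · rw [List.foldl_cons, hK', hK1]
      rfl
    · rw [List.foldl_cons, hKu', hKu]

lemma setdefault_id_spec (q : PySem.Dict String String) (k : String)
    (hnd : q.keys.Nodup) (hid : ∀ x ∈ q.keys, q.get? x = some x) :
    (q.setdefault k k).keys.Nodup ∧
    (∀ x ∈ (q.setdefault k k).keys, (q.setdefault k k).get? x = some x) ∧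
    (q.setdefault k k).keys = addK q.keys k := by
  by_cases hc : q.contains k
  · have hmem : k ∈ q.keys := (PySem.Dict.contains_iff_mem_keys _ _).1 hc
    rw [PySem.Dict.setdefault_of_contains q k hc]
    exact ⟨hnd, hid, by simp [addK, hmem]⟩
  · have hnmem : k ∉ q.keys := fun hm => hc ((PySem.Dict.contains_iff_mem_keys _ _).2 hm)
    have hcf : q.contains k = false := by
      cases hcc : q.contains k
      · rfl
      · exact absurd hcc hc
    rw [PySem.Dict.setdefault_of_not_contains q k hcf]
    have hkeys : (q.insert k k).keys = q.keys ++ [k] :=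
      PySem.Dict.keys_insert_of_not_contains q k hcf
    refine ⟨?_, ?_, by rw [hkeys]; simp [addK, hnmem]⟩
    · rw [hkeys]
      apply List.Nodup.append hnd (List.nodup_singleton k)
      intro z hz hz2
      simp at hz2
      exact hnmem (hz2 ▸ hz)
    · intro x hx
      rw [hkeys] at hx
      rcases List.mem_append.1 hx with hx' | hx'
      · have hxk : x ≠ k := fun he => hnmem (he ▸ hx')
        rw [PySem.Dict.get?_insert_of_ne q k hxk]
        exact hid x hx'
      · simp at hx'
        rw [hx']
        exact PySem.Dict.get?_insert_self q k k

lemma mem_foldl_addK_of_mem :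
    ∀ (es : List (String × String)) (ks : List String) (x : String), x ∈ ks →
      x ∈ es.foldl (fun ks ab => addK (addK ks ab.1) ab.2) ks := by
  intro es
  induction es with
  | nil => intro ks x hx; exact hx
  | cons ab es ih =>
    intro ks x hx
    exact ih _ x (mem_addK_of_mem _ _ _ (mem_addK_of_mem _ _ _ hx))

lemma build_aux :
    ∀ (es : List (String × String)) (q : PySem.Dict String String),
      q.keys.Nodup → (∀ x ∈ q.keys, q.get? x = some x) →
      (es.foldl (fun p ab => (p.setdefault ab.1 ab.1).setdefault ab.2 ab.2) q).keys.Nodup ∧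
      (∀ x ∈ (es.foldl (fun p ab => (p.setdefault ab.1 ab.1).setdefault ab.2 ab.2) q).keys,
        (es.foldl (fun p ab => (p.setdefault ab.1 ab.1).setdefault ab.2 ab.2) q).get? x = some x) ∧
      (es.foldl (fun p ab => (p.setdefault ab.1 ab.1).setdefault ab.2 ab.2) q).keys
        = es.foldl (fun ks ab => addK (addK ks ab.1) ab.2) q.keys ∧
      (∀ ab ∈ es, ab.1 ∈ (es.foldl (fun p ab => (p.setdefault ab.1 ab.1).setdefault ab.2 ab.2) q).keys ∧
        ab.2 ∈ (es.foldl (fun p ab => (p.setdefault ab.1 ab.1).setdefault ab.2 ab.2) q).keys) := by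
  intro es
  induction es with
  | nil => intro q hnd hid; exact ⟨hnd, hid, rfl, by simp⟩
  | cons ab es ih =>
    intro q hnd hid
    obtain ⟨hnd1, hid1, hK1⟩ := setdefault_id_spec q ab.1 hnd hid
    obtain ⟨hnd2, hid2, hK2⟩ := setdefault_id_spec (q.setdefault ab.1 ab.1) ab.2 hnd1 hid1
    obtain ⟨hnd', hid', hK', hmem'⟩ := ih ((q.setdefault ab.1 ab.1).setdefault ab.2 ab.2) hnd2 hid2
    refine ⟨hnd', hid', ?_, ?_⟩
    · rw [List.foldl_cons, hK', hK2, hK1]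
      rfl
    · intro e he
      rcases List.mem_cons.1 he with he' | he'
      · subst he'
        constructor
        · rw [List.foldl_cons, hK']
          apply mem_foldl_addK_of_mem
          rw [hK2, hK1]
          exact mem_addK_of_mem _ _ _ (mem_addK_self _ _)
        · rw [List.foldl_cons, hK']
          apply mem_foldl_addK_of_mem
          rw [hK2]
          exact mem_addK_self _ _
      · exact hmem' e he'

lemma circuits_loop (r : String → String) (d : String → Nat) :
    ∀ (L : List String) (p : PySem.Dict String String)
      (cd : PySem.Dict String (List String)), UFInv p r d → (∀ k ∈ L, k ∈ p.keys) →
      (L.foldl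
        (fun (st : PySem.Dict String String × PySem.Dict String (List String)) k =>
          let f := pvFindA st.1.size st.1 k
          (f.1, st.2.modify f.2 [] (· ++ [k]))) (p, cd)).2
      = L.foldl (fun cd k => cd.modify (r k) [] (· ++ [k])) cd := by
  intro L
  induction L with
  | nil => intro p cd _ _; rfl
  | cons k L ih =>
    intro p cd hUF hmem
    have hk := hmem k (by simp)
    obtain ⟨hf2, hQ, hK, _⟩ := find_spec r d p.size p hUF k hk (uf_depth_lt_size p r d hUF k hk)
    simp only [List.foldl_cons, hf2]
    exact ih (pvFindA p.size p k).1 (cd.modify (r k) [] (· ++ [k])) hQ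
      (fun k' hk' => by rw [hK]; exact hmem k' (by simp [hk']))

def pvUpd (m : String → Bool) (k : String) : List (String × List String) → List (String × List String)
  | [] => [(k, [k])]
  | q :: rest => if m q.1 then (q.1, q.2 ++ [k]) :: rest else q :: pvUpd m k rest

lemma upd_congr (m m' : String → Bool) (k : String) :
    ∀ pairs, (∀ q ∈ pairs, m q.1 = m' q.1) → pvUpd m k pairs = pvUpd m' k pairs := by
  intro pairs
  induction pairs with
  | nil => intro; rfl
  | cons q rest ih =>
    intro hq
    have hhd := hq q (by simp)
    simp only [pvUpd, hhd]
    by_cases h : m' q.1 <;>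
      simp [h, ih (fun q hq' => hq q (by simp [hq']))]

lemma upd_fsts (m : String → Bool) (k : String) :
    ∀ pairs, (pvUpd m k pairs).map Prod.fst
      = if pairs.any (fun q => m q.1) then pairs.map Prod.fst else pairs.map Prod.fst ++ [k] := by
  intro pairs
  induction pairs with
  | nil => simp [pvUpd]
  | cons q rest ih =>
    by_cases h : m q.1
    · simp [pvUpd, h]
    · simp only [pvUpd, h, List.map_cons, List.any_cons, Bool.false_or]
      by_cases h2 : rest.any (fun q => m q.1) <;> simp [h2, ih]

lemma upd_fst_mem (m : String → Bool) (k : String) :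
    ∀ pairs, ∀ q' ∈ pvUpd m k pairs, q'.1 = k ∨ ∃ q ∈ pairs, q'.1 = q.1 := by
  intro pairs
  induction pairs with
  | nil =>
    intro q' hq'
    simp [pvUpd] at hq'
    simp [hq']
  | cons q rest ih =>
    intro q' hq'
    by_cases h : m q.1
    · simp only [pvUpd, h, if_true] at hq'
      rcases List.mem_cons.1 hq' with he | he
      · right; exact ⟨q, by simp, by rw [he]⟩
      · right; exact ⟨q', by simp [he], rfl⟩
    · simp only [pvUpd, h] at hq'
      rcases List.mem_cons.1 hq' with he | he
      · right; exact ⟨q, by simp, by rw [he]⟩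
      · rcases ih q' he with h1 | ⟨q2, hq2, he2⟩
        · exact Or.inl h1
        · exact Or.inr ⟨q2, by simp [hq2], he2⟩

lemma upd_of_none (m : String → Bool) (k : String) :
    ∀ pairs, (∀ q ∈ pairs, m q.1 = false) → pvUpd m k pairs = pairs ++ [(k, [k])] := by
  intro pairs
  induction pairs with
  | nil => intro; rfl
  | cons q rest ih =>
    intro hnone
    have hh : m q.1 = false := hnone q (by simp)
    rw [List.cons_append]
    simp only [pvUpd, hh]
    rw [ih (fun q' hq' => hnone q' (by simp [hq']))]
    simp

lemma modify_mk {κ : Type} [BEq κ] [LawfulBEq κ] (f : String → κ) (k : String) :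
    ∀ (pairs : List (String × List String)),
      pairs.Pairwise (fun q q' => f q.1 ≠ f q'.1) →
      (PySem.Dict.mk (pairs.map (fun q => (f q.1, q.2)))).modify (f k) [] (· ++ [k])
        = PySem.Dict.mk ((pvUpd (fun x => f x == f k) k pairs).map (fun q => (f q.1, q.2))) := by
  intro pairs
  induction pairs with
  | nil => intro; rfl
  | cons q rest ih =>
    intro hpw
    have hpwr := (List.pairwise_cons.1 hpw).2
    have hne := (List.pairwise_cons.1 hpw).1
    have hD : (q :: rest).map (fun q => (f q.1, q.2))
        = (f q.1, q.2) :: rest.map (fun q => (f q.1, q.2)) := List.map_cons ..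
    by_cases hm : f q.1 = f k
    · have hrest : ∀ q' ∈ rest, (f q'.1 == f k) = false := by
        intro q' hq'
        simp only [beq_eq_false_iff_ne]
        intro he
        exact hne q' hq' (hm.trans he.symm)
      have hcont : (PySem.Dict.mk ((q :: rest).map (fun q => (f q.1, q.2)))).contains (f k) = true := by
        rw [hD]
        simp [PySem.Dict.contains, hm]
      have hget : (PySem.Dict.mk ((q :: rest).map (fun q => (f q.1, q.2)))).get? (f k) = some q.2 := by
        rw [hD]
        simp only [PySem.Dict.get?]
        rw [List.find?_cons_of_pos (by simp [hm])]
        rfl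
      have hgd : (PySem.Dict.mk ((q :: rest).map (fun q => (f q.1, q.2)))).getD (f k) [] = q.2 := by
        rw [PySem.Dict.getD, hget]
        rfl
      show (PySem.Dict.mk ((q :: rest).map (fun q => (f q.1, q.2)))).insert (f k)
          (((PySem.Dict.mk ((q :: rest).map (fun q => (f q.1, q.2)))).getD (f k) []) ++ [k]) = _
      rw [PySem.Dict.insert, if_pos hcont, hgd]
      have hupd : pvUpd (fun x => f x == f k) k (q :: rest) = (q.1, q.2 ++ [k]) :: rest := by
        simp [pvUpd, hm]
      rw [hupd, hD, List.map_cons, List.map_cons]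
      refine congrArg PySem.Dict.mk ?_
      refine congrArg₂ List.cons ?_ ?_
      · simp [hm]
      · rw [List.map_map]
        apply List.map_congr_left
        intro q' hq'
        simp only [Function.comp_def]
        rw [hrest q' hq']
        simp
    · have hmf : (f q.1 == f k) = false := by simp [hm]
      by_cases hany : rest.any (fun q' => f q'.1 == f k)
      · have hcontr : (PySem.Dict.mk (rest.map (fun q => (f q.1, q.2)))).contains (f k) = true := by
          simp only [PySem.Dict.contains]
          rw [List.any_map]
          simpa [Function.comp_def] using hany
        have hcont : (PySem.Dict.mk ((q :: rest).map (fun q => (f q.1, q.2)))).contains (f k) = true := by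
          rw [hD]
          simp only [PySem.Dict.contains, List.any_cons]
          rw [List.any_map]
          simp only [Function.comp_def]
          rw [hany]
          simp
        have hgskip : (PySem.Dict.mk ((q :: rest).map (fun q => (f q.1, q.2)))).get? (f k)
            = (PySem.Dict.mk (rest.map (fun q => (f q.1, q.2)))).get? (f k) := by
          rw [hD]
          simp only [PySem.Dict.get?]
          rw [List.find?_cons_of_neg (by simp [hmf])]
        rw [hD] at hgskip
        have ihr2 : (PySem.Dict.mk (rest.map (fun q => (f q.1, q.2)))).insert (f k)
            (((PySem.Dict.mk (rest.map (fun q => (f q.1, q.2)))).getD (f k) []) ++ [k])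
            = PySem.Dict.mk ((pvUpd (fun x => f x == f k) k rest).map (fun q => (f q.1, q.2))) :=
          ih hpwr
        rw [PySem.Dict.insert, if_pos hcontr] at ihr2
        show (PySem.Dict.mk ((q :: rest).map (fun q => (f q.1, q.2)))).insert (f k)
            (((PySem.Dict.mk ((q :: rest).map (fun q => (f q.1, q.2)))).getD (f k) []) ++ [k]) = _
        rw [PySem.Dict.insert, if_pos hcont]
        have hupd : pvUpd (fun x => f x == f k) k (q :: rest) = q :: pvUpd (fun x => f x == f k) k rest := by
          simp [pvUpd, hmf]
        rw [hupd, hD, List.map_cons, List.map_cons]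
        refine congrArg PySem.Dict.mk ?_
        refine congrArg₂ List.cons ?_ ?_
        · rw [hmf]
          simp
        · have hit := congrArg PySem.Dict.items ihr2
          simp only [PySem.Dict.items] at hit
          rw [← hit]
          apply List.map_congr_left
          intro p hp
          rw [PySem.Dict.getD, PySem.Dict.getD, hgskip]
      · have hanyf : rest.any (fun q' => f q'.1 == f k) = false := by
          cases hh : rest.any (fun q' => f q'.1 == f k)
          · rfl
          · exact absurd hh hany
        have hnone : ∀ q' ∈ (q :: rest), (fun x => f x == f k) q'.1 = false := by
          intro q' hq'
          rcases List.mem_cons.1 hq' with he | he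
          · rw [he]; exact hmf
          · simpa using List.any_eq_false.1 hanyf q' he
        have hcont : (PySem.Dict.mk ((q :: rest).map (fun q => (f q.1, q.2)))).contains (f k) = false := by
          simp only [PySem.Dict.contains]
          rw [List.any_map]
          apply List.any_eq_false.2
          intro q' hq'
          simpa [Function.comp_def] using hnone q' hq'
        have hgnone : (PySem.Dict.mk ((q :: rest).map (fun q => (f q.1, q.2)))).get? (f k) = none := by
          simp only [PySem.Dict.get?]
          rw [List.find?_eq_none.2]
          · rfl
          · intro p hp
            rcases List.mem_map.1 hp with ⟨q', hq', he⟩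
            rw [← he]
            simpa using hnone q' hq'
        have hgd : (PySem.Dict.mk ((q :: rest).map (fun q => (f q.1, q.2)))).getD (f k) [] = [] := by
          rw [PySem.Dict.getD, hgnone]
          rfl
        show (PySem.Dict.mk ((q :: rest).map (fun q => (f q.1, q.2)))).insert (f k)
            (((PySem.Dict.mk ((q :: rest).map (fun q => (f q.1, q.2)))).getD (f k) []) ++ [k]) = _
        rw [PySem.Dict.insert, hcont, hgd]
        simp only [Bool.false_eq_true, if_false]
        rw [upd_of_none _ _ _ hnone, List.map_append]
        rfl

lemma group_fold_eq (f : String → String) (g : String → Int) :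
    ∀ (L : List String) (pairs : List (String × List String)),
      (∀ x ∈ L, ∀ y ∈ L, (f x = f y ↔ g x = g y)) →
      (∀ x ∈ L, ∀ q ∈ pairs, (f x = f q.1 ↔ g x = g q.1)) →
      pairs.Pairwise (fun q q' => f q.1 ≠ f q'.1) →
      pairs.Pairwise (fun q q' => g q.1 ≠ g q'.1) →
      ∃ pairs' : List (String × List String),
        L.foldl (fun cd k => cd.modify (f k) [] (· ++ [k]))
            (PySem.Dict.mk (pairs.map (fun q => (f q.1, q.2))))
          = PySem.Dict.mk (pairs'.map (fun q => (f q.1, q.2))) ∧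
        L.foldl (fun cd k => cd.modify (g k) [] (· ++ [k]))
            (PySem.Dict.mk (pairs.map (fun q => (g q.1, q.2))))
          = PySem.Dict.mk (pairs'.map (fun q => (g q.1, q.2))) := by
  intro L
  induction L with
  | nil =>
    intro pairs _ _ _ _
    exact ⟨pairs, rfl, rfl⟩
  | cons k L ih =>
    intro pairs hL hpairs hpwf hpwg
    have hfk := modify_mk f k pairs hpwf
    have hgk := modify_mk g k pairs hpwg
    have hcongr : pvUpd (fun x => g x == g k) k pairs = pvUpd (fun x => f x == f k) k pairs := by
      refine upd_congr _ _ k pairs ?_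
      intro q hq
      by_cases hf : f q.1 = f k
      · have hg : g q.1 = g k := ((hpairs k (by simp) q hq).1 hf.symm).symm
        simp [hf, hg]
      · have hg : ¬ g q.1 = g k := fun hg =>
          hf (((hpairs k (by simp) q hq).2 hg.symm).symm)
        simp [hf, hg]
    rw [hcongr] at hgk
    set pairs1 := pvUpd (fun x => f x == f k) k pairs with hpairs1
    have hfst1 := upd_fsts (fun x => f x == f k) k pairs
    rw [← hpairs1] at hfst1
    have hK : ∀ x ∈ L, ∀ q' ∈ pairs1, (f x = f q'.1 ↔ g x = g q'.1) := by
      intro x hx q' hq'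
      rcases upd_fst_mem (fun x => f x == f k) k pairs q' hq' with he | ⟨q2, hq2, he⟩
      · rw [he]
        exact hL x (by simp [hx]) k (by simp)
      · rw [he]
        exact hpairs x (by simp [hx]) q2 hq2
    have hpw1f : pairs1.Pairwise (fun q q' => f q.1 ≠ f q'.1) := by
      apply (List.pairwise_map (R := fun a b => f a ≠ f b) (f := Prod.fst)).1
      rw [hfst1]
      by_cases hany : pairs.any (fun q => f q.1 == f k)
      · rw [if_pos hany]
        exact (List.pairwise_map).2 hpwf
      · rw [if_neg hany]
        rw [List.pairwise_append]
        refine ⟨(List.pairwise_map).2 hpwf, List.pairwise_singleton _ _, ?_⟩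
        intro a ha b hb
        simp at hb
        rw [hb]
        rcases List.mem_map.1 ha with ⟨q2, hq2, he⟩
        rw [← he]
        have hanyf : pairs.any (fun q => f q.1 == f k) = false := by
          cases hh : pairs.any (fun q => f q.1 == f k)
          · rfl
          · exact absurd hh hany
        have := List.any_eq_false.1 hanyf q2 hq2
        simpa using this
    have hpw1g : pairs1.Pairwise (fun q q' => g q.1 ≠ g q'.1) := by
      apply (List.pairwise_map (R := fun a b => g a ≠ g b) (f := Prod.fst)).1
      rw [hfst1]
      by_cases hany : pairs.any (fun q => f q.1 == f k)
      · rw [if_pos hany]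
        exact (List.pairwise_map).2 hpwg
      · rw [if_neg hany]
        rw [List.pairwise_append]
        refine ⟨(List.pairwise_map).2 hpwg, List.pairwise_singleton _ _, ?_⟩
        intro a ha b hb
        simp at hb
        rw [hb]
        rcases List.mem_map.1 ha with ⟨q2, hq2, he⟩
        rw [← he]
        have hanyf : pairs.any (fun q => f q.1 == f k) = false := by
          cases hh : pairs.any (fun q => f q.1 == f k)
          · rfl
          · exact absurd hh hany
        have hf := List.any_eq_false.1 hanyf q2 hq2
        simp only [Bool.not_eq_true, beq_eq_false_iff_ne, ne_eq] at hf
        intro hg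
        exact hf (((hpairs k (by simp) q2 hq2).2 hg.symm).symm)
    obtain ⟨pairs', hA, hB⟩ := ih pairs1 (fun x hx y hy => hL x (by simp [hx]) y (by simp [hy]))
      hK hpw1f hpw1g
    refine ⟨pairs', ?_, ?_⟩
    · rw [List.foldl_cons, hfk, hA]
    · rw [List.foldl_cons, hgk, hB]

theorem main_eq (es : List (String × String)) : create_circuits es = create_circuits_alt es := by
  have hkE : (PySem.Dict.empty : PySem.Dict String String).keys = [] := by
    simp [PySem.Dict.keys, PySem.Dict.empty]
  have hkEI : (PySem.Dict.empty : PySem.Dict String Int).keys = [] := by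
    simp [PySem.Dict.keys, PySem.Dict.empty]
  obtain ⟨hnd0, hid0, hK0, hmem0⟩ := build_aux es PySem.Dict.empty
    (by rw [hkE]; exact List.nodup_nil)
    (by intro x hx; rw [hkE] at hx; exact absurd hx (List.not_mem_nil))
  set p0 := pvBuildParent es with hp0
  have hC0 : Coupled p0 PySem.Dict.empty 0 id (fun _ => 0) := by
    refine ⟨⟨hnd0, ?_⟩, by rw [hkEI]; exact List.nodup_nil, ?_, ?_, ?_, ?_, ?_⟩
    · intro x hx
      refine ⟨x, hid0 x hx, hx, rfl, fun _ => rfl, fun hne => absurd rfl hne, ?_⟩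
      apply List.countP_pos_iff.2
      exact ⟨x, hx, by simp⟩
    · intro x hx; rw [hkEI] at hx; exact absurd hx (List.not_mem_nil)
    · intro x hx _; exact hid0 x hx
    · intro x hx; rw [hkEI] at hx; exact absurd hx (List.not_mem_nil)
    · intro x hx; rw [hkEI] at hx; exact absurd hx (List.not_mem_nil)
    · intro x hx; rw [hkEI] at hx; exact absurd hx (List.not_mem_nil)
  obtain ⟨rF, dF, hCf, hOf, hKf, hKuf⟩ := run_coupled es p0 PySem.Dict.empty [] 0 id
    (fun _ => 0) hC0 hkEI.symm hmem0
  set P1 := es.foldl (fun p ab => pvUnionA p ab.1 ab.2) p0 with hP1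
  set F := es.foldl pvStepB (PySem.Dict.empty, [], 0) with hF
  rw [hkEI] at hKf
  have hK0' : p0.keys = List.foldl (fun ks ab => addK (addK ks ab.1) ab.2) [] es := by
    have hh := hK0
    rw [hkE] at hh
    exact hh
  have hKeq : P1.keys = F.2.1 := by
    rw [hKuf, hOf, hKf, hK0']
  -- A's grouping loop computes the grouping by the final root function rF
  have hA := circuits_loop rF dF P1.keys P1 PySem.Dict.empty hCf.1 (fun k hk => hk)
  -- the two group dicts have equal value lists
  have hker : ∀ x ∈ P1.keys, ∀ y ∈ P1.keys, (rF x = rF y ↔ F.1.getD x 0 = F.1.getD y 0) := by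
    intro x hx y hy
    rw [hKuf, hK0', ← hKf] at hx hy
    rw [hOf] at hKeq
    exact (hCf.2.2.2.2.2.1 x hx y hy).symm
  obtain ⟨pairs', hGA, hGB⟩ := group_fold_eq rF (fun n => F.1.getD n 0) P1.keys []
    hker (by intro x _ q hq; exact absurd hq (List.not_mem_nil)) List.Pairwise.nil
    List.Pairwise.nil
  show PySem.List.sorted
      ((P1.keys.foldl
        (fun (st : PySem.Dict String String × PySem.Dict String (List String)) k =>
          let f := pvFindA st.1.size st.1 k
          (f.1, st.2.modify f.2 [] (· ++ [k])))
        (P1, PySem.Dict.empty)).2).values (fun l => PySem.List.len l) true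
    = PySem.List.sorted
      ((F.2.1.foldl
        (fun (g : PySem.Dict Int (List String)) n => g.modify (F.1.getD n 0) [] (· ++ [n]))
        PySem.Dict.empty)).values (fun l => PySem.List.len l) true
  rw [hA, ← hKeq]
  have hGA' : P1.keys.foldl (fun cd k => cd.modify (rF k) [] (· ++ [k])) PySem.Dict.empty
      = PySem.Dict.mk (pairs'.map (fun q => (rF q.1, q.2))) := hGA
  have hGB' : P1.keys.foldl (fun g n => g.modify (F.1.getD n 0) [] (· ++ [n])) PySem.Dict.empty
      = PySem.Dict.mk (pairs'.map (fun q => (F.1.getD q.1 0, q.2))) := hGB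
  rw [hGA', hGB']
  have hv1 : (PySem.Dict.mk (pairs'.map (fun q => (rF q.1, q.2)))).values
      = pairs'.map Prod.snd := by
    simp [PySem.Dict.values, List.map_map, Function.comp_def]
  have hv2 : (PySem.Dict.mk (pairs'.map (fun q => (F.1.getD q.1 0, q.2)))).values
      = pairs'.map Prod.snd := by
    simp [PySem.Dict.values, List.map_map, Function.comp_def]
  rw [hv1, hv2]

-- ===== VERDICT (by name: the statement is the Claim_ definition above) =====
theorem create_circuits_spec : Claim_equal_create_circuits := by
  intro connections _
  exact main_eq connections
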